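-- pv_equiv track=rewrite | github.com/alsoba13/contests | adventofcode/2023/10/10.py | zoom_grid
-- ===== SOURCE A (Python) =====
-- def zoom_grid(grid):
--     zooms = {
--         '|': [['.','#','.'],
--              ['.','#','.'],
--              ['.','#','.']],
--
--         '-': [['.','.','.'],
--              ['#','#','#'],
--              ['.','.','.']],
--
--         'L': [['.','#','.'],
--              ['.','#','#'],
--              ['.','.','.']],
--
--         'J': [['.','#','.'],
--              ['#','#','.'],
--              ['.','.','.']],
--
--         '7': [['.','.','.'],
--              ['#','#','.'],
--              ['.','#','.']],
--
--         'F': [['.','.','.'],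
--              ['.','#','#'],
--              ['.','#','.']],
--
--         '.': [['.','.','.'],
--              ['.','.','.'],
--              ['.','.','.']],
--     }
--     N, M = len(grid), len(grid[0])
--     new_grid = [['' for y in range(3*M)] for x in range(3*N)]
--     for x in range(N):
--         for y in range(M):
--             for xx in range(3):
--                 for yy in range(3):
--                     new_grid[3*x+xx][3*y+yy] = zooms[grid[x][y]][xx][yy]
--     return new_grid
-- ===== SOURCE B (Python) =====
-- def zoom_grid(grid):
--     # Derive each 3x3 tile from the pipe's connection directions instead of a
--     # hard-coded tile table: a pipe draws '#' in its centre and towards each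
--     # direction it connects to.
--     dirs = {'|': 'NS', '-': 'EW', 'L': 'NE', 'J': 'NW',
--             '7': 'SW', 'F': 'SE', '.': ''}
--     N, M = len(grid), len(grid[0])
--     out = []
--     for x in range(N):
--         rows = [[], [], []]
--         for y in range(M):
--             d = dirs[grid[x][y]]
--             rows[0] += ['.', '#' if 'N' in d else '.', '.']
--             rows[1] += ['#' if 'W' in d else '.',
--                         '#' if d else '.',
--                         '#' if 'E' in d else '.']
--             rows[2] += ['.', '#' if 'S' in d else '.', '.']
--         out += rows
--     return out
-- ===== Notes on version B (the rewrite author's own statement) =====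
-- stated objective: alternative
-- what changed: B replaces A's hard-coded 3x3-tile lookup table and preallocated 3Nx3M array of index writes with a semantic construction: each pipe char is mapped to its connection directions (N/S/E/W) and the three sub-rows of its tile are computed from those directions ('#' in the centre and towards each connected direction), appended row by row.
import Mathlib
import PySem

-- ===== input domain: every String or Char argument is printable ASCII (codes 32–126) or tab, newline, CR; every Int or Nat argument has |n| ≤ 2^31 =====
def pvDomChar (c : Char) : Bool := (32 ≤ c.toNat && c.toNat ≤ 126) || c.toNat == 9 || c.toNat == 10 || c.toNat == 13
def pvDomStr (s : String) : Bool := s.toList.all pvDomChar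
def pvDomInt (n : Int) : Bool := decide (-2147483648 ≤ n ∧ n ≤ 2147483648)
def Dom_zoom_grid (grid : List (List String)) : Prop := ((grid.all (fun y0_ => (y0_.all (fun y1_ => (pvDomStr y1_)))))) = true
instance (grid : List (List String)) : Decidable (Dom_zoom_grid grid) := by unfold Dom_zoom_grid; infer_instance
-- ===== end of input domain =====

-- B derives each 3x3 tile from the pipe's connection directions (N/S/E/W) — '#' in the centre
-- and towards each connected side — instead of A's hard-coded tile table written into a
-- preallocated 3N×3M array by index.

-- ===== PORT A =====
-- the zooms dict of the Python A, verbatim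
def pvZoomTable : PySem.Dict String (List (List String)) := PySem.Dict.ofList
  [ ("|", [[".","#","."],[".","#","."],[".","#","."]]),
    ("-", [[".",".","."],["#","#","#"],[".",".","."]]),
    ("L", [[".","#","."],[".","#","#"],[".",".","."]]),
    ("J", [[".","#","."],["#","#","."],[".",".","."]]),
    ("7", [[".",".","."],["#","#","."],[".","#","."]]),
    ("F", [[".",".","."],[".","#","#"],[".","#","."]]),
    (".", [[".",".","."],[".",".","."],[".",".","."]]) ]

-- zooms[c]; KeyError (missing key) is excluded by Pre_zoom_grid
def pvZoomLookup (c : String) : List (List String) := (pvZoomTable.get? c).getD []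

-- new_grid[i][j] = v  (in range under Pre_)
def pvSet2 (g : List (List String)) (i j : Nat) (v : String) : List (List String) :=
  g.set i ((g.getD i []).set j v)

def zoom_grid (grid : List (List String)) : List (List String) :=
  let N := grid.length
  let M := (grid.headD []).length
  let init := (List.range (3*N)).map (fun _ => (List.range (3*M)).map (fun _ => ""))
  (List.range N).foldl (fun ng x =>
    (List.range M).foldl (fun ng y =>
      (List.range 3).foldl (fun ng xx =>
        (List.range 3).foldl (fun ng yy =>
          pvSet2 ng (3*x+xx) (3*y+yy)
            (((pvZoomLookup ((grid.getD x []).getD y "")).getD xx []).getD yy ""))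
          ng) ng) ng) init

-- ===== PORT B =====
-- the dirs dict of Source B
def pvDirTable : PySem.Dict String String := PySem.Dict.ofList
  [ ("|", "NS"), ("-", "EW"), ("L", "NE"), ("J", "NW"),
    ("7", "SW"), ("F", "SE"), (".", "") ]

-- dirs[c]; KeyError (missing key) is excluded by Pre_zoom_grid
def pvDirLookup (c : String) : String := (pvDirTable.get? c).getD ""

-- the three 3-cell extensions Source B appends to rows[0], rows[1], rows[2] for one cell
def pvTrip (grid : List (List String)) (x y : Nat) :
    List String × List String × List String :=
  let dl := (pvDirLookup ((grid.getD x []).getD y "")).toList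
  ([".", if 'N' ∈ dl then "#" else ".", "."],
   [if 'W' ∈ dl then "#" else ".", if dl ≠ [] then "#" else ".",
    if 'E' ∈ dl then "#" else "."],
   [".", if 'S' ∈ dl then "#" else ".", "."])

def zoom_grid_alt (grid : List (List String)) : List (List String) :=
  let N := grid.length
  let M := (grid.headD []).length
  (List.range N).foldl (fun out x =>
    let rows := (List.range M).foldl
      (fun (r : List String × List String × List String) y =>
        let t := pvTrip grid x y
        (r.1 ++ t.1, r.2.1 ++ t.2.1, r.2.2 ++ t.2.2))
      ([], [], [])
    out ++ [rows.1, rows.2.1, rows.2.2]) []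

-- ===== PRECONDITION & SPEC =====
def pvKeys : List String := ["|", "-", "L", "J", "7", "F", "."]

-- Pre_ excludes exactly the inputs where the Python A raises: the empty grid (IndexError on
-- grid[0]), rows shorter than the first row (IndexError on grid[x][y]) and cells that are not
-- one of the seven pipe characters (KeyError on zooms[...]).
def Pre_zoom_grid (grid : List (List String)) : Prop :=
  grid ≠ [] ∧ ∀ row ∈ grid, (grid.headD []).length ≤ row.length ∧
    ∀ y < (grid.headD []).length, row.getD y "" ∈ pvKeys
instance (grid : List (List String)) : Decidable (Pre_zoom_grid grid) := by
  unfold Pre_zoom_grid; infer_instance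

def pvWitness_zoom_grid : List (List String) := [["F", "7"], ["L", "J"]]

def Spec_zoom_grid (grid : List (List String)) (out : List (List String)) : Prop := out = zoom_grid_alt grid
instance (grid : List (List String)) (out : List (List String)) : Decidable (Spec_zoom_grid grid out) := by unfold Spec_zoom_grid; infer_instance

-- ===== CLAIM (what is proved, stated in full; the proofs are below) =====
def Claim_equal_zoom_grid : Prop := ∀ (grid : List (List String)), Dom_zoom_grid grid → Pre_zoom_grid grid → Spec_zoom_grid grid (zoom_grid grid)

-- ===== LEMMAS AND PROOFS =====

-- the 3-wide zoom slice of cell (x,y) at sub-row xx (read off A's table)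
def pvZRow (grid : List (List String)) (x y xx : Nat) : List String :=
  (pvZoomLookup ((grid.getD x []).getD y "")).getD xx []

-- first m blocks of output row 3*x+xx
def pvRowPref (grid : List (List String)) (x xx m : Nat) : List String :=
  (List.range m).flatMap (fun y => pvZRow grid x y xx)

-- first n row-blocks of the output
def pvPref (grid : List (List String)) (M n : Nat) : List (List String) :=
  (List.range n).flatMap (fun x =>
    [pvRowPref grid x 0 M, pvRowPref grid x 1 M, pvRowPref grid x 2 M])

lemma pvZRow_len (grid : List (List String)) (x y xx : Nat)
    (hc : (grid.getD x []).getD y "" ∈ pvKeys) (hxx : xx < 3) :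
    (pvZRow grid x y xx).length = 3 := by
  unfold pvZRow pvZoomLookup pvZoomTable
  simp only [pvKeys, List.mem_cons, List.not_mem_nil, or_false] at hc
  interval_cases xx <;> rcases hc with h|h|h|h|h|h|h <;> rw [h] <;> decide

lemma pvRowPref_len (grid : List (List String)) (x xx m : Nat)
    (h : ∀ y < m, (pvZRow grid x y xx).length = 3) :
    (pvRowPref grid x xx m).length = 3 * m := by
  induction m with
  | zero => simp [pvRowPref]
  | succ m ih =>
    unfold pvRowPref at *
    rw [List.range_succ, List.flatMap_append, List.length_append,
      ih (fun y hy => h y (by omega))]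
    simp [h m (by omega)]
    omega

lemma pvPref_len (grid : List (List String)) (M n : Nat) :
    (pvPref grid M n).length = 3 * n := by
  induction n with
  | zero => simp [pvPref]
  | succ n ih =>
    unfold pvPref at *
    rw [List.range_succ, List.flatMap_append, List.length_append, ih]
    simp
    omega

lemma cons3_getD (l : List String) (h : l.length = 3) (t : List String) :
    l.getD 0 "" :: l.getD 1 "" :: l.getD 2 "" :: t = l ++ t := by
  match l, h with
  | [a, b, c], _ => rfl

lemma setTripleDrop (pre rest : List String) (k : Nat) (hk : pre.length = k)
    (h : 3 ≤ rest.length) (v0 v1 v2 : String) :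
    (((pre ++ rest).set k v0).set (k+1) v1).set (k+2) v2
      = pre ++ [v0, v1, v2] ++ rest.drop 3 := by
  match rest, h with
  | a :: b :: c :: t, _ =>
    subst hk
    rw [List.set_append, if_neg (by omega)]
    rw [List.set_append, if_neg (by omega)]
    rw [List.set_append, if_neg (by omega)]
    simp

lemma pvRowPref_succ (grid : List (List String)) (x xx m : Nat) :
    pvRowPref grid x xx (m+1) = pvRowPref grid x xx m ++ pvZRow grid x m xx := by
  unfold pvRowPref
  rw [List.range_succ, List.flatMap_append]
  simp

lemma pvSet2_mid (P : List (List String)) (a b c : List String)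
    (T : List (List String)) (k j : Nat) (hk : P.length = k) (v : String) :
    pvSet2 (P ++ a :: b :: c :: T) k j v = P ++ (a.set j v) :: b :: c :: T := by
  subst hk
  unfold pvSet2
  rw [List.getD_eq_getElem?_getD, List.getElem?_append_right (by omega)]
  rw [List.set_append, if_neg (by omega)]
  simp

lemma pvSet2_mid1 (P : List (List String)) (a b c : List String)
    (T : List (List String)) (k j : Nat) (hk : P.length = k) (v : String) :
    pvSet2 (P ++ a :: b :: c :: T) (k+1) j v = P ++ a :: (b.set j v) :: c :: T := by
  subst hk
  unfold pvSet2
  rw [List.getD_eq_getElem?_getD, List.getElem?_append_right (by omega)]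
  rw [List.set_append, if_neg (by omega)]
  have h1 : P.length + 1 - P.length = 1 := by omega
  simp [h1]

lemma pvSet2_mid2 (P : List (List String)) (a b c : List String)
    (T : List (List String)) (k j : Nat) (hk : P.length = k) (v : String) :
    pvSet2 (P ++ a :: b :: c :: T) (k+2) j v = P ++ a :: b :: (c.set j v) :: T := by
  subst hk
  unfold pvSet2
  rw [List.getD_eq_getElem?_getD, List.getElem?_append_right (by omega)]
  rw [List.set_append, if_neg (by omega)]
  have h1 : P.length + 2 - P.length = 2 := by omega
  simp [h1]

-- effect of the y-loop of A for a fixed x on the three rows 3x..3x+2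
lemma yfold (grid : List (List String)) (M x : Nat)
    (P T : List (List String)) (r0 r1 r2 : List String)
    (hP : P.length = 3*x)
    (h0 : r0.length = 3*M) (h1 : r1.length = 3*M) (h2 : r2.length = 3*M)
    (hz : ∀ y < M, ∀ xx < 3, (pvZRow grid x y xx).length = 3) :
    ∀ m ≤ M,
      (List.range m).foldl (fun ng y =>
        (List.range 3).foldl (fun ng xx =>
          (List.range 3).foldl (fun ng yy =>
            pvSet2 ng (3*x+xx) (3*y+yy)
              (((pvZoomLookup ((grid.getD x []).getD y "")).getD xx []).getD yy ""))
            ng) ng) (P ++ r0 :: r1 :: r2 :: T)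
      = P ++ (pvRowPref grid x 0 m ++ r0.drop (3*m))
          :: (pvRowPref grid x 1 m ++ r1.drop (3*m))
          :: (pvRowPref grid x 2 m ++ r2.drop (3*m)) :: T := by
  intro m
  induction m with
  | zero => simp [pvRowPref]
  | succ m ih =>
    intro hm
    have h3 : List.range 3 = [0, 1, 2] := rfl
    rw [h3]
    rw [List.range_succ, List.foldl_append]
    rw [show List.range 3 = [0,1,2] from rfl] at ih
    rw [ih (by omega)]
    simp only [List.foldl_cons, List.foldl_nil]
    simp only [Nat.add_zero]
    simp only [pvSet2_mid _ _ _ _ _ _ _ hP, pvSet2_mid1 _ _ _ _ _ _ _ hP,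
      pvSet2_mid2 _ _ _ _ _ _ _ hP]
    have hp0 := pvRowPref_len grid x 0 m (fun y hy => hz y (by omega) 0 (by omega))
    have hp1 := pvRowPref_len grid x 1 m (fun y hy => hz y (by omega) 1 (by omega))
    have hp2 := pvRowPref_len grid x 2 m (fun y hy => hz y (by omega) 2 (by omega))
    rw [setTripleDrop _ _ _ hp0 (by rw [List.length_drop]; omega),
      setTripleDrop _ _ _ hp1 (by rw [List.length_drop]; omega),
      setTripleDrop _ _ _ hp2 (by rw [List.length_drop]; omega)]
    simp only [pvRowPref_succ, pvZRow, List.drop_drop]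
    have harith : 3*m + 3 = 3*(m+1) := by omega
    simp [harith]
    refine ⟨?_, ?_, ?_⟩ <;>
      exact cons3_getD _ (hz m (by omega) _ (by omega)) _

-- effect of the whole x-loop of A
lemma xfold (grid : List (List String)) (N M : Nat) (hN : N = grid.length)
    (hz : ∀ x < N, ∀ y < M, ∀ xx < 3, (pvZRow grid x y xx).length = 3) :
    ∀ n ≤ N,
      (List.range n).foldl (fun ng x =>
        (List.range M).foldl (fun ng y =>
          (List.range 3).foldl (fun ng xx =>
            (List.range 3).foldl (fun ng yy =>
              pvSet2 ng (3*x+xx) (3*y+yy)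
                (((pvZoomLookup ((grid.getD x []).getD y "")).getD xx []).getD yy ""))
              ng) ng) ng)
        (List.replicate (3*N) (List.replicate (3*M) ""))
      = pvPref grid M n ++ List.replicate (3*(N-n)) (List.replicate (3*M) "") := by
  intro n
  induction n with
  | zero => simp [pvPref]
  | succ n ih =>
    intro hn
    rw [show List.range 3 = [0, 1, 2] from rfl]
    rw [List.range_succ, List.foldl_append]
    rw [show ([0, 1, 2] : List Nat) = List.range 3 from rfl]
    rw [ih (by omega)]
    simp only [List.foldl_cons, List.foldl_nil]
    rw [show 3*(N-n) = 3*(N-(n+1)) + 1 + 1 + 1 from by omega]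
    rw [List.replicate_succ, List.replicate_succ, List.replicate_succ]
    rw [yfold grid M n _ _ _ _ _ (pvPref_len grid M n)
      (List.length_replicate) (List.length_replicate) (List.length_replicate)
      (hz n (by omega)) M le_rfl]
    rw [List.drop_eq_nil_of_le (by rw [List.length_replicate])]
    have hsucc : pvPref grid M (n+1) = pvPref grid M n
        ++ [pvRowPref grid n 0 M, pvRowPref grid n 1 M, pvRowPref grid n 2 M] := by
      unfold pvPref
      rw [List.range_succ, List.flatMap_append]
      simp
    rw [hsucc]
    simp

-- B's direction-derived tile agrees with A's table on the seven pipe keys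
lemma trip_eq_zrow (grid : List (List String)) (x y : Nat)
    (hc : (grid.getD x []).getD y "" ∈ pvKeys) :
    pvTrip grid x y =
      (pvZRow grid x y 0, pvZRow grid x y 1, pvZRow grid x y 2) := by
  unfold pvTrip pvZRow pvZoomLookup pvZoomTable pvDirLookup pvDirTable
  simp only [pvKeys, List.mem_cons, List.not_mem_nil, or_false] at hc
  rcases hc with h|h|h|h|h|h|h <;> rw [h] <;> decide

-- B's inner y-loop accumulates the three row prefixes
lemma bInner (grid : List (List String)) (x : Nat) (a b c : List String) :
    ∀ m, (List.range m).foldl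
        (fun (r : List String × List String × List String) y =>
          let t := pvTrip grid x y
          (r.1 ++ t.1, r.2.1 ++ t.2.1, r.2.2 ++ t.2.2)) (a, b, c)
      = (a ++ (List.range m).flatMap (fun y => (pvTrip grid x y).1),
         b ++ (List.range m).flatMap (fun y => (pvTrip grid x y).2.1),
         c ++ (List.range m).flatMap (fun y => (pvTrip grid x y).2.2)) := by
  intro m
  induction m with
  | zero => simp
  | succ m ih =>
    rw [List.range_succ, List.foldl_append, ih]
    simp

-- B's outer x-loop produces the flatMap of its three rows
lemma bOuter (f : Nat → List (List String)) :
    ∀ n (acc : List (List String)),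
      (List.range n).foldl (fun out x => out ++ f x) acc
        = acc ++ (List.range n).flatMap f := by
  intro n
  induction n with
  | zero => simp
  | succ n ih =>
    intro acc
    rw [List.range_succ, List.foldl_append, ih]
    simp

-- under Pre_, B's row for (x,xx) is exactly A's pvRowPref
lemma bRow_eq (grid : List (List String)) (x M : Nat)
    (hc : ∀ y < M, (grid.getD x []).getD y "" ∈ pvKeys) :
    (List.range M).flatMap (fun y => (pvTrip grid x y).1) = pvRowPref grid x 0 M
    ∧ (List.range M).flatMap (fun y => (pvTrip grid x y).2.1) = pvRowPref grid x 1 M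
    ∧ (List.range M).flatMap (fun y => (pvTrip grid x y).2.2) = pvRowPref grid x 2 M := by
  unfold pvRowPref
  refine ⟨?_, ?_, ?_⟩ <;>
  · apply List.flatMap_congr
    intro y hy
    rw [trip_eq_zrow grid x y (hc y (List.mem_range.mp hy))]

-- ===== VERDICT (by name: the statement is the Claim_ definition above) =====
theorem zoom_grid_spec : Claim_equal_zoom_grid := by
  intro grid _ hpre
  unfold Spec_zoom_grid zoom_grid zoom_grid_alt
  simp only []
  have hkey : ∀ x < grid.length, ∀ y < (grid.headD []).length,
      (grid.getD x []).getD y "" ∈ pvKeys := by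
    intro x hx y hy
    have hmem : grid.getD x [] ∈ grid := by
      rw [List.getD_eq_getElem grid [] hx]
      exact List.getElem_mem hx
    exact (hpre.2 _ hmem).2 y hy
  have hz : ∀ x < grid.length, ∀ y < (grid.headD []).length, ∀ xx < 3,
      (pvZRow grid x y xx).length = 3 := by
    intro x hx y hy xx hxx
    exact pvZRow_len _ _ _ _ (hkey x hx y hy) hxx
  have hinit : (List.range (3*grid.length)).map
        (fun _ => (List.range (3*(grid.headD []).length)).map (fun _ => ""))
      = List.replicate (3*grid.length)
          (List.replicate (3*(grid.headD []).length) "") := by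
    simp [List.map_const']
  rw [hinit]
  rw [xfold grid grid.length (grid.headD []).length rfl hz grid.length le_rfl]
  simp only [Nat.sub_self, Nat.mul_zero, List.replicate_zero, List.append_nil]
  rw [bOuter _ grid.length []]
  rw [List.nil_append]
  unfold pvPref
  apply List.flatMap_congr
  intro x hx
  rw [bInner]
  simp only [List.nil_append]
  obtain ⟨h0, h1, h2⟩ := bRow_eq grid x (grid.headD []).length
    (hkey x (List.mem_range.mp hx))
  rw [h0, h1, h2]
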